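-- pv_equiv track=rewrite | github.com/varun-ag1/unpod | apps/super/super_services/evals/eval_accuracy_scorer.py | _chunk_source
-- ===== SOURCE A (Python) =====
-- from typing import Dict, List
--
-- def _chunk_source(text: str, chunk_size: int = 400) -> List[str]:
--     """Split source text into word-based chunks for granular embedding match."""
--     words = text.split()
--     chunks = [
--         " ".join(words[i : i + chunk_size])
--         for i in range(0, len(words), chunk_size)
--         if words[i : i + chunk_size]
--     ]
--     return chunks or [text]
-- ===== SOURCE B (Python) =====
-- from typing import List
--
-- def _chunk_source(text: str, chunk_size: int = 400) -> List[str]: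
--     """Split source text into word-based chunks via one streaming accumulate-and-flush pass."""
--     if chunk_size <= 0:
--         return [text]
--     chunks: List[str] = []
--     buf: List[str] = []
--     for w in text.split():
--         buf.append(w)
--         if len(buf) == chunk_size:
--             chunks.append(" ".join(buf))
--             buf = []
--     if buf:
--         chunks.append(" ".join(buf))
--     return chunks or [text]
-- ===== Notes on version B (the rewrite author's own statement) =====
-- stated objective: alternative
-- what changed: Replaces the index-range slicing comprehension with a single streaming pass that accumulates words in a buffer and flushes a joined chunk whenever the buffer reaches chunk_size; non-positive chunk_size is handled by an explicit guard returning [text].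
import Mathlib
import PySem

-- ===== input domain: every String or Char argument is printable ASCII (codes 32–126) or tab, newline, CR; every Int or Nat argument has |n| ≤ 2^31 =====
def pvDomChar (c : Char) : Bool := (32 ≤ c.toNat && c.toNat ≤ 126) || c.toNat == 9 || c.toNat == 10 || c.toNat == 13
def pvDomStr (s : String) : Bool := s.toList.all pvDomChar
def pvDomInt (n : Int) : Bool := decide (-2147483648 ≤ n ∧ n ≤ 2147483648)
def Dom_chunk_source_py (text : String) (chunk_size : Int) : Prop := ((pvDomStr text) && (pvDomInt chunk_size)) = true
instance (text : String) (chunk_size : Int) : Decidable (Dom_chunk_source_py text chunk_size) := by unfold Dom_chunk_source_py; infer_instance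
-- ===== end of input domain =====

-- B replaces A's index-range slicing comprehension by one streaming accumulate-and-flush
-- pass over the words (objective: alternative decomposition, same asymptotic cost).

-- ===== PORT A =====
def chunk_source_py (text : String) (chunk_size : Int) : List String :=
  let words := PySem.Str.split₀ text
  let chunks :=
    ((PySem.List.pyRange 0 (words.length : Int) chunk_size).filter
        (fun i => !(PySem.List.slice words (some i) (some (i + chunk_size))).isEmpty)).map
      (fun i => PySem.Str.join " " (PySem.List.slice words (some i) (some (i + chunk_size))))
  if chunks.isEmpty then [text] else chunks

-- ===== PORT B =====
def chunk_source_py_alt (text : String) (chunk_size : Int) : List String :=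
  if chunk_size ≤ 0 then [text]
  else
    let st := (PySem.Str.split₀ text).foldl
      (fun (st : List String × List String) w =>
        let buf := st.2 ++ [w]
        if (buf.length : Int) = chunk_size then (st.1 ++ [PySem.Str.join " " buf], ([] : List String))
        else (st.1, buf))
      ([], [])
    let chunks := if st.2.isEmpty then st.1 else st.1 ++ [PySem.Str.join " " st.2]
    if chunks.isEmpty then [text] else chunks

-- ===== PRECONDITION & SPEC =====
-- Pre_ excludes only chunk_size = 0, where A raises ValueError (range() step must not be zero).
def Pre_chunk_source_py (text : String) (chunk_size : Int) : Prop := chunk_size ≠ 0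
instance (text : String) (chunk_size : Int) : Decidable (Pre_chunk_source_py text chunk_size) := by unfold Pre_chunk_source_py; infer_instance
def pvWitness_chunk_source_py : String × Int := ("hello brave new world", 3)

def Spec_chunk_source_py (text : String) (chunk_size : Int) (out : List String) : Prop := out = chunk_source_py_alt text chunk_size
instance (text : String) (chunk_size : Int) (out : List String) : Decidable (Spec_chunk_source_py text chunk_size out) := by unfold Spec_chunk_source_py; infer_instance

-- ===== CLAIM (what is proved, stated in full; the proofs are below) =====
def Claim_equal_chunk_source_py : Prop := ∀ (text : String) (chunk_size : Int), Dom_chunk_source_py text chunk_size → Pre_chunk_source_py text chunk_size → Spec_chunk_source_py text chunk_size (chunk_source_py text chunk_size)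
-- ===== LEMMAS AND PROOFS =====

-- canonical chunking: successive groups of k words, each joined by " "
def chunksOf (k : Nat) : List String → List String
  | [] => []
  | w :: ws => PySem.Str.join " " ((w :: ws).take k) :: chunksOf k (ws.drop (k - 1))
termination_by l => l.length
decreasing_by simp

theorem chunksOf_eq (k : Nat) (hk : 1 ≤ k) (l : List String) :
    chunksOf k l = if l = [] then [] else PySem.Str.join " " (l.take k) :: chunksOf k (l.drop k) := by
  cases l with
  | nil => rw [chunksOf]; simp
  | cons w ws =>
    have h : (w :: ws).drop k = ws.drop (k - 1) := by
      cases k with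
      | zero => omega
      | succ k' => simp
    rw [chunksOf, if_neg (by simp : ¬ (w :: ws) = []), h]

theorem pyRange_pos_nil (a b s : Int) (hs : 0 < s) (h : b ≤ a) :
    PySem.List.pyRange a b s = [] := by
  rw [PySem.List.pyRange_of_pos a b hs]
  simp [show ¬ a < b by omega]

theorem pyRange_pos_cons (a b s : Int) (hs : 0 < s) (hab : a < b) :
    PySem.List.pyRange a b s = a :: PySem.List.pyRange (a + s) b s := by
  rw [PySem.List.pyRange_of_pos a b hs, PySem.List.pyRange_of_pos (a + s) b hs]
  by_cases h : a + s < b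
  · have hnum : b - a + s - 1 = (b - (a + s) + s - 1) + 1 * s := by ring
    have : (b - a + s - 1) / s = (b - (a + s) + s - 1) / s + 1 := by
      rw [hnum, Int.add_mul_ediv_right _ _ (by omega : s ≠ 0)]
    have hpos : 0 ≤ (b - (a + s) + s - 1) / s := by
      apply Int.ediv_nonneg <;> omega
    rw [if_pos hab, if_pos h, this]
    have : ((b - (a + s) + s - 1) / s + 1).toNat = ((b - (a + s) + s - 1) / s).toNat + 1 := by omega
    rw [this, List.range_succ_eq_map]
    simp only [List.map_cons, List.map_map, Function.comp_def]
    congr 1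
    · simp
    · apply List.map_congr_left
      intro x _
      push_cast
      ring
  · -- exactly one element left: k ≤ b - a + s - 1 < 2s
    have h1 : (1 : Int) ≤ (b - a + s - 1) / s := by
      rw [Int.le_ediv_iff_mul_le hs]; omega
    have h2 : (b - a + s - 1) / s < 2 := by
      rw [Int.ediv_lt_iff_lt_mul hs]; omega
    have : (b - a + s - 1) / s = 1 := by omega
    rw [if_pos hab, if_neg h, this]
    simp

theorem pyRange_shift (a b c s : Int) (hs : 0 < s) :
    PySem.List.pyRange (a + c) (b + c) s = (PySem.List.pyRange a b s).map (· + c) := by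
  rw [PySem.List.pyRange_of_pos _ _ hs, PySem.List.pyRange_of_pos a b hs]
  have : b + c - (a + c) = b - a := by ring
  rw [this]
  by_cases hab : a < b
  · rw [if_pos (by omega : a + c < b + c), if_pos hab, List.map_map]
    apply List.map_congr_left
    intro x _
    simp only [Function.comp]
    ring
  · rw [if_neg (by omega : ¬ a + c < b + c), if_neg hab]
    simp

theorem flatMap_congr_mem {α β : Type} (l : List α) (f g : α → List β)
    (h : ∀ x ∈ l, f x = g x) : l.flatMap f = l.flatMap g := by
  induction l with
  | nil => rfl
  | cons x xs ih =>
    simp [List.flatMap_cons, h x (by simp), ih (fun y hy => h y (by simp [hy]))]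

-- A's comprehension, with the always-true nonemptiness filter removed, as a flatMap
theorem achunks_eq (ws : List String) (k : Nat) (hk : 1 ≤ k) :
    (PySem.List.pyRange 0 (ws.length : Int) (k : Int)).flatMap
      (fun i => [PySem.Str.join " " (PySem.List.slice ws (some i) (some (i + (k : Int))))])
      = chunksOf k ws := by
  have hks : (0 : Int) < (k : Int) := by exact_mod_cast hk
  induction hn : ws.length using Nat.strong_induction_on generalizing ws with
  | _ n ih =>
  subst hn
  cases ws with
  | nil =>
    rw [pyRange_pos_nil _ _ _ hks (by simp), chunksOf]
    simp
  | cons w ws' =>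
    rw [pyRange_pos_cons _ _ _ hks (by exact_mod_cast Nat.succ_pos ws'.length)]
    rw [List.flatMap_cons]
    have htail : PySem.List.pyRange (0 + (k : Int)) (((w :: ws').length : Nat) : Int) (k : Int)
        = (PySem.List.pyRange 0 (((w :: ws').length : Int) - (k : Int)) (k : Int)).map (· + (k : Int)) := by
      have h := pyRange_shift 0 (((w :: ws').length : Int) - (k : Int)) (k : Int) (k : Int) hks
      simpa using h
    rw [htail, List.flatMap_map]
    have htailEq :
        (PySem.List.pyRange 0 (((w :: ws').length : Int) - (k : Int)) (k : Int)).flatMap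
          (fun a => [PySem.Str.join " " (PySem.List.slice (w :: ws') (some (a + (k : Int))) (some (a + (k : Int) + (k : Int))))])
        = chunksOf k ((w :: ws').drop k) := by
      by_cases hle : ((w :: ws').length : Int) - (k : Int) ≤ 0
      · rw [pyRange_pos_nil _ _ _ hks hle]
        have hlek : (w :: ws').length ≤ k := by
          have h2 : ((w :: ws').length : Int) ≤ (k : Int) := by omega
          exact_mod_cast h2
        rw [List.drop_eq_nil_of_le hlek, chunksOf]
        simp
      · have hlen : ((((w :: ws').drop k).length : Nat) : Int) = ((w :: ws').length : Int) - (k : Int) := by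
          rw [List.length_drop]
          omega
        rw [← hlen]
        rw [flatMap_congr_mem _ _
          (fun i => [PySem.Str.join " " (PySem.List.slice ((w :: ws').drop k) (some i) (some (i + (k : Int))))])]
        · exact ih (((w :: ws').drop k).length) (by rw [List.length_drop, List.length_cons]; omega) _ rfl
        · intro i hi
          rw [PySem.List.mem_pyRange_iff_of_pos hks] at hi
          obtain ⟨hi0, _, _⟩ := hi
          obtain ⟨m, rfl⟩ := Int.eq_ofNat_of_zero_le hi0
          congr 1
          have h1 : PySem.List.slice (w :: ws') (some ((m : Int) + (k : Int))) (some ((m : Int) + (k : Int) + (k : Int)))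
              = (((w :: ws').drop (m + k)).take k) := by
            rw [show ((m : Int) + (k : Int)) = (((m + k : Nat)) : Int) by push_cast; ring]
            exact PySem.List.slice_natCast_add _ _ _
          have h2 : PySem.List.slice ((w :: ws').drop k) (some (m : Int)) (some ((m : Int) + (k : Int)))
              = ((((w :: ws').drop k).drop m).take k) :=
            PySem.List.slice_natCast_add _ _ _
          rw [h1, h2, List.drop_drop, Nat.add_comm k m]
    rw [htailEq]
    rw [chunksOf_eq k hk (w :: ws')]
    simp

-- B's streaming pass, phrased structurally
def bpart (k : Nat) (buf : List String) : List String → List String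
  | [] => if buf.isEmpty then [] else [PySem.Str.join " " buf]
  | w :: ws => if (buf ++ [w]).length = k then PySem.Str.join " " (buf ++ [w]) :: bpart k [] ws
               else bpart k (buf ++ [w]) ws

theorem bpart_eq_chunksOf (k : Nat) (hk : 1 ≤ k) (ws : List String) :
    ∀ buf, buf.length < k → bpart k buf ws = chunksOf k (buf ++ ws) := by
  induction ws with
  | nil =>
    intro buf hbuf
    rw [List.append_nil]
    cases hb : buf with
    | nil => rw [chunksOf]; simp [bpart]
    | cons x xs =>
      subst hb
      rw [chunksOf_eq k hk, if_neg (by simp)]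
      rw [List.take_of_length_le (le_of_lt hbuf), List.drop_eq_nil_of_le (le_of_lt hbuf), chunksOf]
      simp [bpart]
  | cons w ws ih =>
    intro buf hbuf
    rw [chunksOf_eq k hk]
    by_cases hfull : (buf ++ [w]).length = k
    · rw [bpart, if_pos hfull]
      rw [ih [] (by simp only [List.length_nil]; omega)]
      have hne : ¬ (buf ++ w :: ws = []) := by simp
      rw [if_neg hne]
      have hbw : buf ++ w :: ws = (buf ++ [w]) ++ ws := by simp
      rw [hbw, List.take_append_of_le_length (by omega), List.drop_append_of_le_length (by omega)]
      rw [List.take_of_length_le (by omega), List.drop_eq_nil_of_le (by omega)]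
    · rw [bpart, if_neg hfull]
      have hlt : (buf ++ [w]).length < k := by
        simp only [List.length_append, List.length_singleton] at hfull ⊢
        omega
      rw [ih (buf ++ [w]) hlt]
      rw [chunksOf_eq k hk]
      simp

-- the fold in B computes bpart
def stepFn (k : Int) : (List String × List String) → String → (List String × List String) :=
  fun st w =>
    let b := st.2 ++ [w]
    if (b.length : Int) = k then (st.1 ++ [PySem.Str.join " " b], ([] : List String))
    else (st.1, b)

def flushOf (st : List String × List String) : List String :=
  if st.2.isEmpty then st.1 else st.1 ++ [PySem.Str.join " " st.2]

theorem foldl_step_eq_bpart (k : Nat) (hk : 1 ≤ k) (ws : List String) :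
    ∀ acc buf, buf.length < k →
    flushOf (ws.foldl (stepFn (k : Int)) (acc, buf)) = acc ++ bpart k buf ws := by
  induction ws with
  | nil =>
    intro acc buf hbuf
    cases buf <;> simp [flushOf, bpart]
  | cons w ws ih =>
    intro acc buf hbuf
    rw [List.foldl_cons]
    by_cases hfull : (buf ++ [w]).length = k
    · have hfi : ((buf.length : Int) + 1) = (k : Int) := by
        have h2 : buf.length + 1 = k := by simpa using hfull
        exact_mod_cast h2
      rw [show stepFn (k : Int) (acc, buf) w = (acc ++ [PySem.Str.join " " (buf ++ [w])], ([] : List String)) from by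
        simp [stepFn, hfi]]
      rw [ih _ [] (by simp only [List.length_nil]; omega)]
      rw [bpart, if_pos hfull]
      simp
    · have hfi : ¬ (((buf.length : Int) + 1) = (k : Int)) := by
        intro h
        apply hfull
        have h2 : buf.length + 1 = k := by exact_mod_cast h
        simpa using h2
      rw [show stepFn (k : Int) (acc, buf) w = (acc, buf ++ [w]) from by
        simp [stepFn, hfi]]
      have hlt : (buf ++ [w]).length < k := by
        simp only [List.length_append, List.length_singleton] at hfull ⊢
        omega
      rw [ih _ _ hlt]
      rw [bpart, if_neg hfull]

-- the always-true filter in A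
theorem filter_slice_eq_self (ws : List String) (k : Int) (hk : 0 < k) :
    (PySem.List.pyRange 0 (ws.length : Int) k).filter
      (fun i => !(PySem.List.slice ws (some i) (some (i + k))).isEmpty)
      = PySem.List.pyRange 0 (ws.length : Int) k := by
  rw [List.filter_eq_self]
  intro i hi
  rw [PySem.List.mem_pyRange_iff_of_pos hk] at hi
  obtain ⟨hi0, hin, _⟩ := hi
  obtain ⟨m, rfl⟩ := Int.eq_ofNat_of_zero_le hi0
  obtain ⟨kn, rfl⟩ : ∃ kn : Nat, k = (kn : Int) := ⟨k.toNat, by omega⟩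
  rw [PySem.List.slice_natCast_add]
  have hm : m < ws.length := by exact_mod_cast hin
  have hkn : 0 < kn := by exact_mod_cast hk
  have hne : (ws.drop m).take kn ≠ [] := by
    intro h
    have hl := congrArg List.length h
    simp at hl
    omega
  simp [hne]

theorem map_eq_flatMap_singleton {α β : Type} (l : List α) (f : α → β) :
    l.map f = l.flatMap (fun x => [f x]) := by
  induction l with
  | nil => rfl
  | cons x xs ih => simp [ih]

-- ===== VERDICT (by name: the statement is the Claim_ definition above) =====
theorem chunk_source_py_spec : Claim_equal_chunk_source_py := by
  intro text chunk_size _ hpre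
  unfold Spec_chunk_source_py
  simp only [chunk_source_py, chunk_source_py_alt]
  by_cases hneg : chunk_size ≤ 0
  · -- chunk_size < 0 (0 excluded by Pre_): range is empty, A returns [text]; B's guard returns [text]
    have hlt : chunk_size < 0 := lt_of_le_of_ne hneg hpre
    rw [if_pos hneg]
    have hr : PySem.List.pyRange 0 ((PySem.Str.split₀ text).length : Int) chunk_size = [] := by
      unfold PySem.List.pyRange
      rw [if_neg (by omega : ¬ chunk_size = 0)]
      simp only
      rw [if_neg (by omega : ¬ 0 < chunk_size),
          if_neg (by omega : ¬ (((PySem.Str.split₀ text).length : Nat) : Int) < 0)]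
      simp
    simp [hr]
  · rw [if_neg hneg]
    have hpos : 0 < chunk_size := by omega
    obtain ⟨k, rfl⟩ : ∃ kn : Nat, chunk_size = (kn : Int) := ⟨chunk_size.toNat, by omega⟩
    have hk : 1 ≤ k := by exact_mod_cast hpos
    have hB : flushOf ((PySem.Str.split₀ text).foldl (stepFn (k : Int)) ([], []))
        = chunksOf k (PySem.Str.split₀ text) := by
      rw [foldl_step_eq_bpart k hk _ [] [] (by simp only [List.length_nil]; omega)]
      rw [bpart_eq_chunksOf k hk _ [] (by simp only [List.length_nil]; omega)]
      simp
    rw [filter_slice_eq_self (PySem.Str.split₀ text) (k : Int) hpos]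
    rw [map_eq_flatMap_singleton, achunks_eq (PySem.Str.split₀ text) k hk]
    show (if (chunksOf k (PySem.Str.split₀ text)).isEmpty then [text] else chunksOf k (PySem.Str.split₀ text))
        = (if (flushOf ((PySem.Str.split₀ text).foldl (stepFn (k : Int)) ([], []))).isEmpty then [text]
           else flushOf ((PySem.Str.split₀ text).foldl (stepFn (k : Int)) ([], [])))
    rw [hB]
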